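-- pv_equiv track=rewrite | github.com/guibuzi/PB2-DMS | scripts/subsample_IVR_sequences.py | createAlignments
-- ===== SOURCE A (Python) =====
-- def createAlignments(finalNumber,dates):
--     """
--     The function defines which sequences end up in each final alignment.
--
--     As the sequnces have already been randomized and sorted, the first alignment
--         gets the first sequence for the year, the second alignment gets the
--         second sequence for the year, etc.
--
--     input: total number of alignments, dictionary of sequences by date
--     output: A list of lists the length of the total number of alignments.
--             Each list contains the exact same number of sequences.
--     """
--
--     finalSequences = [[] for x in range(finalNumber)] #make the list of lists
--
--     for date in dates.keys(): #assign sequences to each alignment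
--         if len(dates[date]) >= finalNumber: #
--             for i in range(finalNumber):
--                 finalSequences[i].append(dates[date][i])
--         else:
--             repeat =  int(finalNumber / len(dates[date]))\
--                 + (finalNumber % len(dates[date]) > 0)
--             temp = list(range(len(dates[date]))) * repeat
--             for i in range(finalNumber):
--                 finalSequences[i].append(dates[date][temp[i]])
--
--     assert len([len(l) for l in finalSequences]) == finalNumber #all alignments should have the same number of sequences
--     assert len(set([len(l) for l in finalSequences])) == 1 #all sequences should be the same length
--     assert len(finalSequences[0]) == len(dates.keys()) #each alignment should have one squence per year
--
--     return finalSequences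
-- ===== SOURCE B (Python) =====
-- def createAlignments(finalNumber, dates):
--     # Staged construction: tile each date's sequence list up to finalNumber
--     # entries and cut it there, then transpose the padded columns with zip.
--     cols = [(seqs * -(-finalNumber // len(seqs)))[:finalNumber]
--             for seqs in dates.values()]
--     return [list(row) for row in zip(*cols)] if dates \
--         else [[] for _ in range(finalNumber)]
-- ===== Notes on version B (the rewrite author's own statement) =====
-- stated objective: alternative
-- what changed: B builds each date's whole column at once by list tiling and slicing ((seqs * ceil(n/len))[:n]) and then transposes the columns with zip, instead of A's element-by-element appends into mutable rows with a two-way branch and a temporary index list; B never indexes individual elements.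
import Mathlib
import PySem

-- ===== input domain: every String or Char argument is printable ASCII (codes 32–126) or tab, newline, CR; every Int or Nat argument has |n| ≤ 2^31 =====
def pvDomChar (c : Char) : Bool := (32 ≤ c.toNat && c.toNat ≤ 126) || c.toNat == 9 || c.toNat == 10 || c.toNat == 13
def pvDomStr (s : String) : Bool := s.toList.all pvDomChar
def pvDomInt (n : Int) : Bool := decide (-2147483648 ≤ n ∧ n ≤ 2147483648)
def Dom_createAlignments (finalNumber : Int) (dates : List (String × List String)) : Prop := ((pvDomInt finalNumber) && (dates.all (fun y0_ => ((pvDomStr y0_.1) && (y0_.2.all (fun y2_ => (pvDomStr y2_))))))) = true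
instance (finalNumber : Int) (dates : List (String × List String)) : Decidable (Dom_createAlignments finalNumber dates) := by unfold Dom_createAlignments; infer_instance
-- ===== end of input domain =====

-- B tiles each date's list to finalNumber entries ((seqs*ceil)[:n]) and transposes the
-- columns with zip, replacing A's branched per-element appends into mutable rows (objective: alternative).


-- ===== PORT A =====
-- The Python dict 'dates' is the association list; iterating 'dates.keys()' and looking up
-- 'dates[date]' reads each pair's value in insertion order (dict keys are distinct).
-- 'finalSequences[i].append(x)' is ported as 'fs.set i (fs[i] ++ [x])';
-- 'repeat = int(finalNumber / len(...)) + (...)' uses truncdiv (int() of a true division,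
-- exact on the |n| ≤ 2^31 domain); 'temp = list(range(len)) * repeat' is flatten ∘ replicate.
-- The three final 'assert's hold on every input admitted by Pre_ (where one fails, Python
-- raises, and Pre_ excludes that input), so the port returns the list directly.
def createAlignments (finalNumber : Int) (dates : List (String × List String)) : List (List String) :=
  let finalSequences : List (List String) :=
    (PySem.List.pyRange 0 finalNumber 1).map (fun _ => ([] : List String))
  dates.foldl (fun fs kv =>
    if (kv.2.length : Int) ≥ finalNumber then
      (PySem.List.pyRange 0 finalNumber 1).foldl
        (fun fs i => fs.set i.toNat (PySem.List.pyGetD fs i [] ++ [PySem.List.pyGetD kv.2 i ""])) fs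
    else
      let rep : Int := PySem.Int.truncdiv finalNumber (kv.2.length : Int) +
        (if PySem.Int.mod finalNumber (kv.2.length : Int) > 0 then 1 else 0)
      let temp : List Int := (List.replicate rep.toNat (PySem.List.pyRange 0 (kv.2.length : Int) 1)).flatten
      (PySem.List.pyRange 0 finalNumber 1).foldl
        (fun fs i => fs.set i.toNat
          (PySem.List.pyGetD fs i [] ++ [PySem.List.pyGetD kv.2 (PySem.List.pyGetD temp i 0) ""])) fs)
    finalSequences

-- ===== PORT B =====
-- Hand port of zip(*cols): rows up to the shortest column's length; zip() of no
-- iterables is the empty list (min? of [] is none, giving 0 rows) — exact Python semantics.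
def pyZipStar (cols : List (List String)) : List (List String) :=
  let m : Nat := ((cols.map List.length).min?).getD 0
  (List.range m).map (fun i => cols.map (fun c => c.getD i ""))

-- 'seqs * -(-finalNumber // len(seqs))' is pyRepeat with the ceiling -(floordiv (-n) len);
-- '[:finalNumber]' is slice none (some finalNumber).
def createAlignments_alt (finalNumber : Int) (dates : List (String × List String)) : List (List String) :=
  let cols : List (List String) := dates.map (fun kv =>
    PySem.List.slice
      (PySem.List.pyRepeat kv.2 (-(PySem.Int.floordiv (-finalNumber) (kv.2.length : Int))))
      none (some finalNumber))
  if dates.isEmpty then (PySem.List.pyRange 0 finalNumber 1).map (fun _ => ([] : List String))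
  else pyZipStar cols

-- ===== PRECONDITION & SPEC =====
-- Pre_ excludes exactly the inputs on which Python A raises: finalNumber ≤ 0 (a final assert
-- fails on the empty list of alignments) and any date with an empty sequence list
-- (ZeroDivisionError computing 'repeat').
def Pre_createAlignments (finalNumber : Int) (dates : List (String × List String)) : Prop :=
  1 ≤ finalNumber ∧ ∀ kv ∈ dates, kv.2 ≠ []
instance (finalNumber : Int) (dates : List (String × List String)) : Decidable (Pre_createAlignments finalNumber dates) := by unfold Pre_createAlignments; infer_instance
def pvWitness_createAlignments : Int × (List (String × List String)) := (2, [("2001", ["a", "b"]), ("2002", ["c"])])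

def Spec_createAlignments (finalNumber : Int) (dates : List (String × List String)) (out : List (List String)) : Prop := out = createAlignments_alt finalNumber dates
instance (finalNumber : Int) (dates : List (String × List String)) (out : List (List String)) : Decidable (Spec_createAlignments finalNumber dates out) := by unfold Spec_createAlignments; infer_instance

-- ===== CLAIM (what is proved, stated in full; the proofs are below) =====
def Claim_equal_createAlignments : Prop := ∀ (finalNumber : Int) (dates : List (String × List String)), Dom_createAlignments finalNumber dates → Pre_createAlignments finalNumber dates → Spec_createAlignments finalNumber dates (createAlignments finalNumber dates)

-- ===== LEMMAS AND PROOFS =====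
-- Both sides are proved equal to the common normal form
-- (range n).map (fun i => dates.map (fun kv => kv.2.getD (i % kv.2.length) "")).
def pvPick (kv : String × List String) (i : Nat) : String := kv.2.getD (i % kv.2.length) ""

def pvBform (n : Nat) (dates : List (String × List String)) : List (List String) :=
  (List.range n).map (fun i => dates.map (fun kv => pvPick kv i))

-- ---- A-side ----
def pvAppLoop (n : Nat) (g : Nat → String) (fs : List (List String)) : List (List String) :=
  (List.range n).foldl (fun fs i => fs.set i (fs.getD i [] ++ [g i])) fs

theorem pv_map_range_getD (fs : List (List String)) :
    (List.range fs.length).map (fun i => fs.getD i []) = fs := by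
  refine List.ext_getElem (by simp) ?_
  intro i h1 h2
  simp [List.getElem?_eq_getElem h2]

theorem pvAppLoop_aux (g : Nat → String) (k : Nat) (fs : List (List String)) (hk : k ≤ fs.length) :
    pvAppLoop k g fs
      = (List.range fs.length).map (fun i => if i < k then fs.getD i [] ++ [g i] else fs.getD i []) := by
  induction k with
  | zero => simpa [pvAppLoop] using (pv_map_range_getD fs).symm
  | succ k ih =>
    have hk' : k ≤ fs.length := by omega
    have hklt : k < fs.length := by omega
    rw [pvAppLoop, List.range_succ, List.foldl_append, List.foldl_cons, List.foldl_nil]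
    rw [show (List.range k).foldl (fun fs i => fs.set i (fs.getD i [] ++ [g i])) fs = pvAppLoop k g fs from rfl,
        ih hk']
    have hgd : ((List.range fs.length).map
        (fun i => if i < k then fs.getD i [] ++ [g i] else fs.getD i [])).getD k []
        = fs.getD k [] := by
      rw [List.getD_eq_getElem _ _ (by simpa using hklt)]
      simp [hklt]
    rw [hgd]
    apply List.ext_getElem
    · simp
    · intro j h1 h2
      simp only [List.length_set, List.length_map, List.length_range] at h1 h2
      rw [List.getElem_set]
      simp only [List.getElem_map, List.getElem_range]
      by_cases hjk : k = j
      · subst hjk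
        simp
      · have h3 : (j < k) = (j < k + 1) := by
          apply propext; constructor <;> intro <;> omega
        simp only [h3]
        rw [if_neg hjk]

theorem pvAppLoop_eq (g : Nat → String) (fs : List (List String)) :
    pvAppLoop fs.length g fs = (List.range fs.length).map (fun i => fs.getD i [] ++ [g i]) := by
  rw [pvAppLoop_aux g fs.length fs le_rfl]
  exact List.map_congr_left (fun i hi => by simp [List.mem_range.mp hi])

theorem pvTemp (r len i : Nat) (hi : i < r * len) :
    (List.replicate r (PySem.List.pyRange 0 (len : Int) 1)).flatten.getD i 0 = ((i % len : Nat) : Int) := by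
  induction r generalizing i with
  | zero => omega
  | succ r ih =>
    rw [List.replicate_succ, List.flatten_cons]
    have hl : (PySem.List.pyRange 0 (len : Int) 1).length = len := by
      simp [PySem.List.length_pyRange_one]
    have hmul : (r + 1) * len = r * len + len := by ring
    by_cases hcase : i < len
    · rw [List.getD_append _ _ _ _ (by rw [hl]; omega), List.getD_eq_getElem _ _ (by rw [hl]; omega)]
      rw [PySem.List.getElem_pyRange_one]
      simp [Nat.mod_eq_of_lt hcase]
    · rw [List.getD_append_right _ _ _ _ (by rw [hl]; omega), hl]
      rw [ih (i - len) (by omega)]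
      congr 1
      exact (Nat.mod_eq_sub_mod (by omega)).symm

def pvStep (n : Nat) (fs : List (List String)) (kv : String × List String) : List (List String) :=
  pvAppLoop n (pvPick kv) fs

theorem pvStep_length (n : Nat) (fs : List (List String)) (kv : String × List String)
    (h : fs.length = n) : (pvStep n fs kv).length = n := by
  rw [pvStep, ← h, pvAppLoop_eq]; simp

theorem pvOuter (n : Nat) (ds : List (String × List String)) (fs : List (List String))
    (h : fs.length = n) :
    ds.foldl (pvStep n) fs
      = (List.range n).map (fun i => fs.getD i [] ++ ds.map (fun kv => pvPick kv i)) := by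
  induction ds generalizing fs with
  | nil => simpa using (h ▸ pv_map_range_getD fs).symm
  | cons kv ds ih =>
    rw [List.foldl_cons, ih _ (pvStep_length n fs kv h)]
    apply List.map_congr_left
    intro i hi
    have hi' : i < n := List.mem_range.mp hi
    have hgd : (pvStep n fs kv).getD i [] = fs.getD i [] ++ [pvPick kv i] := by
      rw [pvStep, ← h, pvAppLoop_eq, List.getD_eq_getElem _ _ (by simp; omega)]
      simp
    rw [hgd]
    simp

theorem pvFoldl_pyRange {β : Type} (n : Nat) (F : β → Int → β) (init : β) :
    (PySem.List.pyRange 0 (n : Int) 1).foldl F init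
      = (List.range n).foldl (fun acc (k : Nat) => F acc (k : Int)) init := by
  rw [PySem.List.pyRange_one, List.foldl_map, sub_zero, Int.toNat_natCast]
  apply PySem.List.foldl_congr_mem
  intro acc k _
  rw [zero_add]

theorem pvA_eq_Bform (n : Nat) (dates : List (String × List String))
    (hne : ∀ kv ∈ dates, kv.2 ≠ []) :
    createAlignments (n : Int) dates = pvBform n dates := by
  simp only [createAlignments, pvBform]
  refine Eq.trans (PySem.List.foldl_congr_mem dates _ (pvStep n)
      ((PySem.List.pyRange 0 (n:Int) 1).map (fun _ => ([] : List String))) ?_) ?_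
  case refine_2 =>
    rw [pvOuter n dates _ (by simp [PySem.List.length_pyRange_one])]
    apply List.map_congr_left
    intro i hi
    have hi' : i < n := List.mem_range.mp hi
    have hz : ((PySem.List.pyRange 0 (n:Int) 1).map (fun _ => ([] : List String))).getD i [] = [] := by
      rw [List.getD_eq_getElem _ _ (by simp [PySem.List.length_pyRange_one]; omega)]
      simp
    rw [hz]
    simp
  case refine_1 =>
    intro fs kv hkv
    have hlen : 0 < kv.2.length := List.length_pos_iff.mpr (hne kv hkv)
    by_cases hge : (kv.2.length : Int) ≥ (n : Int)
    · rw [if_pos hge]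
      have hlen' : n ≤ kv.2.length := by exact_mod_cast hge
      rw [pvFoldl_pyRange]
      simp only [Int.toNat_natCast, PySem.List.pyGetD_natCast]
      rw [pvStep, pvAppLoop]
      apply PySem.List.foldl_congr_mem
      intro acc i hi
      have hi' : i < n := List.mem_range.mp hi
      rw [pvPick, Nat.mod_eq_of_lt (by omega)]
    · rw [if_neg hge]
      have hlt : kv.2.length < n := by omega
      have htd : PySem.Int.truncdiv (n:Int) (kv.2.length:Int) = ((n / kv.2.length : Nat) : Int) := by
        simp [PySem.Int.truncdiv, Int.natCast_tdiv_eq_ediv, Int.natCast_ediv]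
      have hrep : (PySem.Int.truncdiv (n:Int) (kv.2.length:Int) +
          (if PySem.Int.mod (n:Int) (kv.2.length:Int) > 0 then 1 else 0)).toNat
          = n / kv.2.length + (if 0 < n % kv.2.length then 1 else 0) := by
        rw [htd, PySem.Int.mod_natCast]
        by_cases hm : 0 < n % kv.2.length
        · rw [if_pos (by exact_mod_cast hm), if_pos hm]
          rw [show ((n / kv.2.length : Nat) : Int) + 1 = ((n / kv.2.length + 1 : Nat) : Int) by push_cast; ring]
          exact Int.toNat_natCast _
        · rw [if_neg (by exact_mod_cast hm), if_neg hm]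
          simpa using Int.toNat_natCast (n / kv.2.length)
      have hbound : n ≤ (n / kv.2.length + (if 0 < n % kv.2.length then 1 else 0)) * kv.2.length := by
        have hdm := Nat.div_add_mod n kv.2.length
        have hml := Nat.mod_lt n hlen
        split_ifs with hm
        · have h2 : (n / kv.2.length + 1) * kv.2.length
              = kv.2.length * (n / kv.2.length) + kv.2.length := by ring
          omega
        · have h2 : (n / kv.2.length + 0) * kv.2.length = kv.2.length * (n / kv.2.length) := by ring
          omega
      rw [pvFoldl_pyRange]
      simp only [Int.toNat_natCast, PySem.List.pyGetD_natCast]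
      rw [pvStep, pvAppLoop]
      apply PySem.List.foldl_congr_mem
      intro acc i hi
      have hi' : i < n := List.mem_range.mp hi
      have htmp : ((List.replicate (PySem.Int.truncdiv (n:Int) (kv.2.length:Int) +
            (if PySem.Int.mod (n:Int) (kv.2.length:Int) > 0 then 1 else 0)).toNat
            (PySem.List.pyRange 0 (kv.2.length:Int) 1)).flatten).getD i 0
          = ((i % kv.2.length : Nat) : Int) := by
        rw [hrep]
        exact pvTemp _ _ _ (Nat.lt_of_lt_of_le hi' hbound)
      rw [htmp, PySem.List.pyGetD_natCast]
      rfl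

-- ---- B-side ----
theorem pvTile (r : Nat) (s : List String) (i : Nat) (hi : i < r * s.length) :
    (List.replicate r s).flatten.getD i "" = s.getD (i % s.length) "" := by
  induction r generalizing i with
  | zero => omega
  | succ r ih =>
    rw [List.replicate_succ, List.flatten_cons]
    have hlen : 0 < s.length := by
      rcases Nat.eq_zero_or_pos s.length with h | h
      · rw [h, Nat.mul_zero] at hi; omega
      · exact h
    have hmul : (r + 1) * s.length = r * s.length + s.length := by ring
    by_cases hcase : i < s.length
    · rw [List.getD_append _ _ _ _ hcase]
      rw [Nat.mod_eq_of_lt hcase]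
    · rw [List.getD_append_right _ _ _ _ (by omega)]
      rw [ih (i - s.length) (by omega)]
      congr 1
      exact (Nat.mod_eq_sub_mod (by omega)).symm

theorem pvPad_spec (n : Nat) (hn : 1 ≤ n) (s : List String) (hs : s ≠ []) :
    PySem.List.slice
        (PySem.List.pyRepeat s (-(PySem.Int.floordiv (-(n : Int)) (s.length : Int))))
        none (some (n : Int))
      = (List.range n).map (fun i => s.getD (i % s.length) "") := by
  have hlen : 0 < s.length := List.length_pos_iff.mpr hs
  have hlenI : (0 : Int) < (s.length : Int) := by exact_mod_cast hlen
  set k : Int := -(PySem.Int.floordiv (-(n : Int)) (s.length : Int)) with hkdef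
  have hk := (PySem.Int.neg_floordiv_neg_eq_iff_of_pos (a := (n : Int)) (q := k) hlenI).mp rfl
  have hkpos : 1 ≤ k := by nlinarith [hk.1, hk.2]
  have hkn : n ≤ k.toNat * s.length := by
    have hcast : ((k.toNat : Int)) = k := Int.toNat_of_nonneg (by omega)
    have : (n : Int) ≤ (k.toNat : Int) * (s.length : Int) := by rw [hcast]; exact hk.2
    exact_mod_cast this
  rw [PySem.List.pyRepeat, PySem.List.slice_to_natCast]
  apply List.ext_getElem
  · simp
    omega
  · intro i h1 h2
    simp only [List.length_take, List.length_flatten] at h1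
    have hi : i < n := by simp at h1; omega
    rw [List.getElem_take, List.getElem_map, List.getElem_range]
    have hif : i < ((List.replicate k.toNat s).flatten).length := by
      simp; omega
    rw [← List.getD_eq_getElem _ "" hif]
    exact pvTile k.toNat s i (by simpa using Nat.lt_of_lt_of_le hi hkn)

theorem pvFoldlMinConst (n : Nat) (t : List Nat) (h : ∀ x ∈ t, x = n) :
    t.foldl min n = n := by
  induction t with
  | nil => rfl
  | cons x t ih =>
    rw [List.foldl_cons, h x (by simp), min_self]
    exact ih (fun y hy => h y (by simp [hy]))

theorem pvMinConst (l : List Nat) (n : Nat) (h : ∀ x ∈ l, x = n) (hne : l ≠ []) :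
    l.min? = some n := by
  cases l with
  | nil => exact absurd rfl hne
  | cons x t =>
    rw [List.min?_cons', h x (by simp)]
    exact congrArg some (pvFoldlMinConst n t (fun y hy => h y (by simp [hy])))

theorem pyZipStar_const (n : Nat) (cols : List (List String)) (hne : cols ≠ [])
    (hl : ∀ c ∈ cols, c.length = n) :
    pyZipStar cols = (List.range n).map (fun i => cols.map (fun c => c.getD i "")) := by
  have hmin : (cols.map List.length).min? = some n :=
    pvMinConst _ n (by intro x hx; obtain ⟨c, hc, rfl⟩ := List.mem_map.mp hx; exact hl c hc)
      (by simpa using hne)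
  rw [pyZipStar, hmin]
  rfl

theorem pvB_eq_Bform (n : Nat) (hn : 1 ≤ n) (dates : List (String × List String))
    (hne : ∀ kv ∈ dates, kv.2 ≠ []) :
    createAlignments_alt (n : Int) dates = pvBform n dates := by
  by_cases hd : dates = []
  · subst hd
    simp [createAlignments_alt, pvBform, PySem.List.pyRange_one, Function.comp_def, List.map_const']
  · simp only [createAlignments_alt]
    rw [if_neg (by simpa [List.isEmpty_iff] using hd)]
    have hcols : dates.map (fun kv =>
        PySem.List.slice
          (PySem.List.pyRepeat kv.2 (-(PySem.Int.floordiv (-(n : Int)) (kv.2.length : Int))))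
          none (some (n : Int)))
        = dates.map (fun kv => (List.range n).map (fun i => pvPick kv i)) :=
      List.map_congr_left (fun kv hkv => pvPad_spec n hn kv.2 (hne kv hkv))
    rw [hcols, pyZipStar_const n _ (by simpa using hd) (by intro c hc; obtain ⟨kv, _, rfl⟩ := List.mem_map.mp hc; simp)]
    rw [pvBform]
    apply List.map_congr_left
    intro i hi
    have hi' : i < n := List.mem_range.mp hi
    rw [List.map_map]
    apply List.map_congr_left
    intro kv _
    show ((List.range n).map (fun j => pvPick kv j)).getD i "" = pvPick kv i
    rw [List.getD_eq_getElem _ _ (by simpa using hi')]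
    simp

-- ===== VERDICT (by name: the statement is the Claim_ definition above) =====
theorem createAlignments_spec : Claim_equal_createAlignments := by
  intro fn dates _ hpre
  obtain ⟨h1, hne⟩ := hpre
  have hn : fn = ((fn.toNat : Nat) : Int) := (Int.toNat_of_nonneg (by omega)).symm
  rw [Spec_createAlignments, hn, pvA_eq_Bform fn.toNat dates hne,
      pvB_eq_Bform fn.toNat (by omega) dates hne]
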